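-- pv_equiv track=rewrite | github.com/pagniol/mcFF | src/bin/src/rna_sec_truct.py | get_stems
-- ===== SOURCE A (Python) =====
-- def get_stems(base_pairs):
--     stems = []
--     current_stem = []
--
--     # Trier les paires de bases par position pour l'identification séquentielle des tiges
--     sorted_pairs = sorted(base_pairs.items())
--     for i, j in sorted_pairs:
--         if not current_stem:
--             current_stem = [(i, j)]
--         else:
--             last_i, last_j = current_stem[-1]
--             # Vérifier si cette paire est consécutive dans la tige
--             if i == last_i or j == last_j -1:
--                 current_stem.append((i, j))
--             else:
--                 stems.append(current_stem)
--                 current_stem = [(i, j)]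
--
--     if current_stem:
--         stems.append(current_stem)
--
--     return stems
-- ===== SOURCE B (Python) =====
-- def get_stems(base_pairs):
--     # Two staged passes: (1) compute the break indices between non-continuing
--     # neighbours, (2) slice the sorted list into segments at those indices.
--     sp = sorted(base_pairs.items())
--     if not sp:
--         return []
--     breaks = [k for k, (prev, cur) in enumerate(zip(sp, sp[1:]), 1)
--               if not (cur[0] == prev[0] or cur[1] == prev[1] - 1)]
--     bounds = [0] + breaks + [len(sp)]
--     return [sp[a:b] for a, b in zip(bounds, bounds[1:])]
-- ===== Notes on version B (the rewrite author's own statement) =====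
-- stated objective: alternative
-- what changed: B replaces A's single accumulator loop (stems, current_stem, final flush) by two staged passes: it first computes the list of break indices between non-continuing sorted neighbours, then slices the sorted list into contiguous segments at those indices.
import Mathlib
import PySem

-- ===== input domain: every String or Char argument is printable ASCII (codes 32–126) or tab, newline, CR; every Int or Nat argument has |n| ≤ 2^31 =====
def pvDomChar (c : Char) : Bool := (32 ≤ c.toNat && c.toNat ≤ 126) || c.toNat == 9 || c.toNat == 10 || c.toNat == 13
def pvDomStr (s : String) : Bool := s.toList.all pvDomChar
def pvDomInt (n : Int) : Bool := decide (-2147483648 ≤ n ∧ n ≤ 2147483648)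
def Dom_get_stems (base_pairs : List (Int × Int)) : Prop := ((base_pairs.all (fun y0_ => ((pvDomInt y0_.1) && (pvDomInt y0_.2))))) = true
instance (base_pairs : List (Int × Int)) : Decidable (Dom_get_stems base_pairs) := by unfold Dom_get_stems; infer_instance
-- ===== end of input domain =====

-- B replaces A's accumulator loop by two staged passes (break indices, then slicing);
-- return values are proved equal (objective: alternative decomposition, same cost).

-- ===== PORT A =====
-- loop body: if not current_stem → start, else compare with current_stem[-1]
def pvStepA (st : List (List (Int × Int)) × List (Int × Int)) (p : Int × Int) :
    List (List (Int × Int)) × List (Int × Int) :=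
  match st.2.getLast? with
  | none => (st.1, [p])                    -- current_stem empty
  | some l =>
    if p.1 == l.1 || p.2 == l.2 - 1 then (st.1, st.2 ++ [p])
    else (st.1 ++ [st.2], [p])

def get_stems (base_pairs : List (Int × Int)) : List (List (Int × Int)) :=
  -- sorted(base_pairs.items()): lexicographic tuple sort = stable sort by 2nd then by 1st
  let sorted_pairs :=
    PySem.List.sorted (PySem.List.sorted (PySem.Dict.ofList base_pairs).items (fun p => p.2))
      (fun p => p.1)
  let r := sorted_pairs.foldl pvStepA ([], [])
  if r.2 = [] then r.1 else r.1 ++ [r.2]   -- final 'if current_stem: stems.append(...)'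

-- ===== PORT B =====
-- [k for k, (prev, cur) in enumerate(zip(sp, sp[1:]), 1) if not (cur[0]==prev[0] or cur[1]==prev[1]-1)]
def pvBreaks (sp : List (Int × Int)) : List Int :=
  (PySem.List.enumerate (sp.zip sp.tail) 1).filterMap     -- sp[1:] = sp.tail (PySem.List.slice_from_one)
    (fun kpc => if !(kpc.2.2.1 == kpc.2.1.1 || kpc.2.2.2 == kpc.2.1.2 - 1) then some kpc.1 else none)

def get_stems_alt (base_pairs : List (Int × Int)) : List (List (Int × Int)) :=
  let sp :=
    PySem.List.sorted (PySem.List.sorted (PySem.Dict.ofList base_pairs).items (fun p => p.2))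
      (fun p => p.1)
  if sp = [] then []                       -- 'if not sp: return []'
  else
    let bounds : List Int := 0 :: (pvBreaks sp ++ [(sp.length : Int)])   -- [0] + breaks + [len(sp)]
    -- [sp[a:b] for a, b in zip(bounds, bounds[1:])]
    (bounds.zip bounds.tail).map (fun ab => PySem.List.slice sp (some ab.1) (some ab.2))

-- ===== PRECONDITION & SPEC =====
def Spec_get_stems (base_pairs : List (Int × Int)) (out : List (List (Int × Int))) : Prop := out = get_stems_alt base_pairs
instance (base_pairs : List (Int × Int)) (out : List (List (Int × Int))) : Decidable (Spec_get_stems base_pairs out) := by unfold Spec_get_stems; infer_instance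

-- ===== CLAIM (what is proved, stated in full; the proofs are below) =====
def Claim_equal_get_stems : Prop := ∀ (base_pairs : List (Int × Int)), Dom_get_stems base_pairs → Spec_get_stems base_pairs (get_stems base_pairs)

-- ===== LEMMAS AND PROOFS =====

-- the common grouping both programs compute: chop the sorted list into maximal runs
def pvTakeRun (prev : Int × Int) : List (Int × Int) → List (Int × Int) × List (Int × Int)
  | [] => ([], [])
  | x :: xs =>
    if x.1 == prev.1 || x.2 == prev.2 - 1 then
      (x :: (pvTakeRun x xs).1, (pvTakeRun x xs).2)
    else ([], x :: xs)

lemma pvTakeRun_snd_le (prev : Int × Int) (xs : List (Int × Int)) :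
    (pvTakeRun prev xs).2.length ≤ xs.length := by
  induction xs generalizing prev with
  | nil => simp [pvTakeRun]
  | cons x xs ih =>
    simp only [pvTakeRun]
    split
    · exact le_trans (ih x) (Nat.le_succ _)
    · simp

lemma pvTakeRun_append (xs : List (Int × Int)) : ∀ prev,
    (pvTakeRun prev xs).1 ++ (pvTakeRun prev xs).2 = xs := by
  induction xs with
  | nil => intro prev; simp [pvTakeRun]
  | cons x xs ih =>
    intro prev
    simp only [pvTakeRun]
    split
    · simpa using ih x
    · simp

def pvSplitRuns : List (Int × Int) → List (List (Int × Int))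
  | [] => []
  | x :: xs => (x :: (pvTakeRun x xs).1) :: pvSplitRuns (pvTakeRun x xs).2
termination_by l => l.length
decreasing_by simpa using Nat.lt_succ_of_le (pvTakeRun_snd_le x xs)

lemma pvSplitRuns_nil : pvSplitRuns [] = [] := by rw [pvSplitRuns]

lemma pvSplitRuns_cons (x : Int × Int) (xs : List (Int × Int)) :
    pvSplitRuns (x :: xs) = (x :: (pvTakeRun x xs).1) :: pvSplitRuns (pvTakeRun x xs).2 := by
  rw [pvSplitRuns]

def pvFinish (r : List (List (Int × Int)) × List (Int × Int)) : List (List (Int × Int)) :=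
  if r.2 = [] then r.1 else r.1 ++ [r.2]

-- A's loop invariant: with a nonempty current stem ending in p, finishing the fold
-- appends the continuation of that stem and then the runs of what remains
lemma A_inv (l : List (Int × Int)) :
    ∀ stems cur p, cur.getLast? = some p →
    pvFinish (l.foldl pvStepA (stems, cur)) =
      stems ++ (cur ++ (pvTakeRun p l).1) :: pvSplitRuns (pvTakeRun p l).2 := by
  induction l with
  | nil =>
    intro stems cur p h
    have hc : cur ≠ [] := by rintro rfl; simp at h
    simp [pvFinish, pvTakeRun, pvSplitRuns_nil, hc]
  | cons x xs ih =>
    intro stems cur p h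
    simp only [List.foldl_cons, pvStepA, h]
    by_cases hb : (x.1 == p.1 || x.2 == p.2 - 1) = true
    · rw [if_pos hb]
      rw [ih stems (cur ++ [x]) x (by simp)]
      simp only [pvTakeRun, hb, if_pos]
      simp
    · rw [if_neg hb]
      rw [ih (stems ++ [cur]) [x] x rfl]
      simp only [pvTakeRun, hb, Bool.false_eq_true, if_false]
      rw [pvSplitRuns_cons]
      simp

lemma A_eq (l : List (Int × Int)) :
    pvFinish (l.foldl pvStepA ([], [])) = pvSplitRuns l := by
  cases l with
  | nil => simp [pvFinish, pvSplitRuns_nil]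
  | cons x xs =>
    simp only [List.foldl_cons, pvStepA]
    rw [show (([], []) : List (List (Int × Int)) × List (Int × Int)).2.getLast? = none from rfl]
    rw [A_inv xs [] [x] x rfl, pvSplitRuns_cons]
    simp

-- B side: recursive characterisation of the break-index list
def pvBrkIdx (k : Int) : (Int × Int) → List (Int × Int) → List Int
  | _, [] => []
  | p, q :: t =>
    if !(q.1 == p.1 || q.2 == p.2 - 1) then k :: pvBrkIdx (k + 1) q t
    else pvBrkIdx (k + 1) q t

lemma pvBreaks_eq (x : Int × Int) (xs : List (Int × Int)) : ∀ k : Int,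
    (PySem.List.enumerate ((x :: xs).zip xs) k).filterMap
      (fun kpc => if !(kpc.2.2.1 == kpc.2.1.1 || kpc.2.2.2 == kpc.2.1.2 - 1)
                  then some kpc.1 else none) = pvBrkIdx k x xs := by
  induction xs generalizing x with
  | nil => intro k; simp [pvBrkIdx, PySem.List.enumerate_nil]
  | cons y ys ih =>
    intro k
    rw [show (x :: y :: ys).zip (y :: ys) = (x, y) :: (y :: ys).zip ys from rfl,
        PySem.List.enumerate_cons, List.filterMap_cons, ih y (k + 1), pvBrkIdx]
    by_cases hb : (y.1 == x.1 || y.2 == x.2 - 1) = true <;> simp [hb]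

-- where pvBrkIdx first breaks: after the first maximal run
lemma pvBrkIdx_run_nil (xs : List (Int × Int)) : ∀ x (k : Int),
    (pvTakeRun x xs).2 = [] → pvBrkIdx k x xs = [] := by
  induction xs with
  | nil => intro x k _; rfl
  | cons z t ih =>
    intro x k h
    by_cases hb : (z.1 == x.1 || z.2 == x.2 - 1) = true
    · rw [show pvBrkIdx k x (z :: t) = pvBrkIdx (k + 1) z t by simp [pvBrkIdx, hb]]
      exact ih z (k + 1) (by simpa [pvTakeRun, hb] using h)
    · exfalso; simp [pvTakeRun, hb] at h
lemma pvBrkIdx_run_cons (xs : List (Int × Int)) : ∀ x (k : Int) y ys,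
    (pvTakeRun x xs).2 = y :: ys →
    pvBrkIdx k x xs = (k + (pvTakeRun x xs).1.length) ::
                      pvBrkIdx (k + (pvTakeRun x xs).1.length + 1) y ys := by
  induction xs with
  | nil => intro x k y ys h; simp [pvTakeRun] at h
  | cons z t ih =>
    intro x k y ys h
    by_cases hb : (z.1 == x.1 || z.2 == x.2 - 1) = true
    · rw [show pvBrkIdx k x (z :: t) = pvBrkIdx (k + 1) z t by simp [pvBrkIdx, hb]]
      rw [ih z (k + 1) y ys (by simpa [pvTakeRun, hb] using h)]
      simp only [pvTakeRun, hb, if_pos, List.length_cons]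
      have e1 : k + 1 + ((pvTakeRun z t).1.length : Int)
          = k + (((pvTakeRun z t).1.length : Int) + 1) := by ring
      rw [e1]
      push_cast
      ring_nf
    · rw [show pvBrkIdx k x (z :: t) = k :: pvBrkIdx (k + 1) z t by simp [pvBrkIdx, hb]]
      have h2 : (pvTakeRun x (z :: t)) = ([], z :: t) := by simp [pvTakeRun, hb]
      rw [h2] at h ⊢
      obtain ⟨rfl, rfl⟩ : z = y ∧ t = ys := by simpa using h
      simp

-- the slicing pass, as mapped over consecutive bound pairs
def pvSegs (sp : List (Int × Int)) (bounds : List Int) : List (List (Int × Int)) :=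
  (bounds.zip bounds.tail).map (fun ab => PySem.List.slice sp (some ab.1) (some ab.2))

lemma pvSegs_cons (sp : List (Int × Int)) (a b : Int) (rest : List Int) :
    pvSegs sp (a :: b :: rest) =
      PySem.List.slice sp (some a) (some b) :: pvSegs sp (b :: rest) := rfl

-- main B lemma: slicing at the break indices reproduces the runs
lemma seg_main : ∀ (n : Nat) (x : Int × Int) (xs sp : List (Int × Int)) (a : Nat),
    xs.length ≤ n → sp.drop a = x :: xs →
    pvSegs sp (((a : Nat) : Int) :: (pvBrkIdx ((a : Int) + 1) x xs ++ [(sp.length : Int)])) =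
      pvSplitRuns (x :: xs) := by
  intro n
  induction n with
  | zero =>
    intro x xs sp a hn hd
    have hx : xs = [] := List.length_eq_zero_iff.mp (Nat.le_zero.mp hn)
    subst hx
    have hlen : sp.length - a = 1 := by
      have h1 := congrArg List.length hd
      simp only [List.length_drop, List.length_cons, List.length_nil] at h1
      omega
    rw [show pvBrkIdx ((a : Int) + 1) x [] = [] from rfl]
    simp only [List.nil_append, pvSegs_cons]
    rw [PySem.List.slice_natCast sp a sp.length, hd, hlen]
    rw [pvSplitRuns_cons, show pvTakeRun x [] = ([], []) from rfl, pvSplitRuns_nil]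
    rfl
  | succ m ih =>
    intro x xs sp a hn hd
    have hlen : sp.length - a = xs.length + 1 := by
      have h1 := congrArg List.length hd
      simp only [List.length_drop, List.length_cons] at h1
      omega
    cases hr : (pvTakeRun x xs).2 with
    | nil =>
      rw [pvBrkIdx_run_nil xs x ((a : Int) + 1) hr]
      simp only [List.nil_append, pvSegs_cons]
      rw [PySem.List.slice_natCast sp a sp.length, hd, hlen]
      rw [List.take_of_length_le (by simp), pvSplitRuns_cons, hr, pvSplitRuns_nil]
      have hx : (pvTakeRun x xs).1 = xs := by
        have h2 := pvTakeRun_append xs x; rw [hr] at h2; simpa using h2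
      rw [hx]
      rfl
    | cons y ys =>
      have hxs : (pvTakeRun x xs).1 ++ y :: ys = xs := by
        have h2 := pvTakeRun_append xs x; rw [hr] at h2; exact h2
      rw [pvBrkIdx_run_cons xs x ((a : Int) + 1) y ys hr]
      generalize hg : (pvTakeRun x xs).1 = r at hxs ⊢
      have hcast1 : (a : Int) + 1 + (r.length : Int)
          = ((a + 1 + r.length : Nat) : Int) := by push_cast; ring
      rw [hcast1, List.cons_append, pvSegs_cons]
      -- the remaining bounds are handled by the induction hypothesis at offset a+1+|r|
      have hdrop : sp.drop (a + 1 + r.length) = y :: ys := by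
        have h3 : sp.drop (a + 1 + r.length) = (sp.drop a).drop (1 + r.length) := by
          rw [List.drop_drop]; ring_nf
        rw [h3, hd, Nat.add_comm 1, List.drop_succ_cons, ← hxs, List.drop_left]
      have hm : ys.length ≤ m := by
        have h4 := congrArg List.length hxs
        simp only [List.length_append, List.length_cons] at h4
        omega
      rw [ih y ys sp (a + 1 + r.length) hm hdrop]
      -- the first segment is the first run
      have hseg : PySem.List.slice sp (some ((a : Nat) : Int))
          (some ((a + 1 + r.length : Nat) : Int)) = x :: r := by
        rw [PySem.List.slice_natCast sp a (a + 1 + r.length), hd]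
        rw [show a + 1 + r.length - a = r.length + 1 by omega]
        rw [List.take_succ_cons, ← hxs, List.take_left]
      rw [hseg, pvSplitRuns_cons x xs, hr, hg]

-- both programs compute the runs of the sorted list
lemma main_all (sp : List (Int × Int)) :
    (if (sp.foldl pvStepA ([], [])).2 = [] then (sp.foldl pvStepA ([], [])).1
     else (sp.foldl pvStepA ([], [])).1 ++ [(sp.foldl pvStepA ([], [])).2]) =
    (if sp = [] then []
     else pvSegs sp (0 :: (pvBreaks sp ++ [(sp.length : Int)]))) := by
  cases hs : sp with
  | nil => rfl
  | cons x xs =>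
    rw [if_neg (List.cons_ne_nil x xs)]
    have hA : pvFinish ((x :: xs).foldl pvStepA ([], [])) = pvSplitRuns (x :: xs) :=
      A_eq (x :: xs)
    unfold pvFinish at hA
    rw [hA]
    have hB : pvBreaks (x :: xs) = pvBrkIdx 1 x xs := by
      unfold pvBreaks
      exact pvBreaks_eq x xs 1
    rw [hB]
    have := seg_main xs.length x xs (x :: xs) 0 le_rfl (by simp)
    simp only [Nat.cast_zero, zero_add] at this
    rw [← this]

-- ===== VERDICT (by name: the statement is the Claim_ definition above) =====
theorem get_stems_spec : Claim_equal_get_stems := by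
  intro bp _
  unfold Spec_get_stems get_stems get_stems_alt
  exact (main_all _).symm ▸ rfl
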